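-- pv_equiv track=rewrite | github.com/kurtn718/kurt-meeting-bot | bot.py | detect_self_harm
-- ===== SOURCE A (Python) =====
-- def detect_self_harm(message_text):
--     """
--     Detect mentions of suicide or self-harm
--     """
--     self_harm_patterns = [
--         'want to die', 'kill myself', 'end my life', 'suicide',
--         'hurt myself', 'harm myself', 'don\'t want to live',
--         'better off dead', 'end it all', 'take my own life'
--     ]
--     message_lower = message_text.lower()
--     return any(pattern in message_lower for pattern in self_harm_patterns)
-- ===== SOURCE B (Python) =====
-- def detect_self_harm(message_text):
--     """
--     Detect mentions of suicide or self-harm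
--     """
--     self_harm_patterns = [
--         'want to die', 'kill myself', 'end my life', 'suicide',
--         'hurt myself', 'harm myself', 'don\'t want to live',
--         'better off dead', 'end it all', 'take my own life'
--     ]
--     s = message_text.lower()
--     for i in range(len(s) + 1):
--         for pattern in self_harm_patterns:
--             if s.startswith(pattern, i):
--                 return True
--     return False
-- ===== Notes on version B (the rewrite author's own statement) =====
-- stated objective: alternative
-- what changed: Replaces ten independent substring containment scans with a single left-to-right pass over the lowered text that tests each position once for any pattern prefix.
import Mathlib
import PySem

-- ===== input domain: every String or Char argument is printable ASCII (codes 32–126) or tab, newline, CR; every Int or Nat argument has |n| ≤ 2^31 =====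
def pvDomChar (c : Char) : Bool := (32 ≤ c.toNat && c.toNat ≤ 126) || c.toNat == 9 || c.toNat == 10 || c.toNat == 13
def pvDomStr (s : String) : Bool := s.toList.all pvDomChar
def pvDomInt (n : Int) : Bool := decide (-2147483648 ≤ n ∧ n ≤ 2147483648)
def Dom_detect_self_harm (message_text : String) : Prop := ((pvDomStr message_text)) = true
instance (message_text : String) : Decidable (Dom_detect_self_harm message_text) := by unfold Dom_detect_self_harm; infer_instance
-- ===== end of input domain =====

-- B replaces A's ten independent substring scans with a single left-to-right pass over the
-- lowered text, testing each position once for any pattern prefix (alternative, same cost).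


-- ===== PORT A =====
def selfHarmPatterns : List String :=
  ["want to die", "kill myself", "end my life", "suicide",
   "hurt myself", "harm myself", "don't want to live",
   "better off dead", "end it all", "take my own life"]

-- any(pattern in message_lower for pattern in self_harm_patterns)
def detect_self_harm (message_text : String) : Bool :=
  let message_lower := PySem.Str.lower message_text
  selfHarmPatterns.any (fun pattern => PySem.Str.isIn pattern message_lower)

-- ===== PORT B =====
-- the inner 'for pattern … if s.startswith(pattern, i): return True' loop at one position,
-- then the outer loop over i = 0 .. len(s) as structural recursion over the suffixes of s
def scanSuffixes (pats : List (List Char)) : List Char → Bool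
  | [] => pats.any (fun p => p.isPrefixOf [])
  | c :: t => pats.any (fun p => p.isPrefixOf (c :: t)) || scanSuffixes pats t

def detect_self_harm_alt (message_text : String) : Bool :=
  let s := PySem.Str.lower message_text
  scanSuffixes (selfHarmPatterns.map String.toList) s.toList

-- ===== PRECONDITION & SPEC =====
def Spec_detect_self_harm (message_text : String) (out : Bool) : Prop := out = detect_self_harm_alt message_text
instance (message_text : String) (out : Bool) : Decidable (Spec_detect_self_harm message_text out) := by unfold Spec_detect_self_harm; infer_instance

-- ===== CLAIM (what is proved, stated in full; the proofs are below) =====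
def Claim_equal_detect_self_harm : Prop := ∀ (message_text : String), Dom_detect_self_harm message_text → Spec_detect_self_harm message_text (detect_self_harm message_text)

-- ===== LEMMAS AND PROOFS =====

-- the single pass finds a pattern iff some pattern is an infix of the text
theorem scanSuffixes_eq_true_iff (pats : List (List Char)) (cs : List Char) :
    scanSuffixes pats cs = true ↔ ∃ p ∈ pats, p <:+: cs := by
  induction cs with
  | nil =>
    simp [scanSuffixes, List.any_eq_true, List.isPrefixOf_iff_prefix]
  | cons c t ih =>
    simp only [scanSuffixes, Bool.or_eq_true, List.any_eq_true,
      List.isPrefixOf_iff_prefix, ih]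
    constructor
    · rintro (⟨p, hp, hpre⟩ | ⟨p, hp, hinf⟩)
      · exact ⟨p, hp, hpre.isInfix⟩
      · exact ⟨p, hp, List.infix_cons_iff.mpr (Or.inr hinf)⟩
    · rintro ⟨p, hp, hinf⟩
      rcases List.infix_cons_iff.mp hinf with hpre | hinf'
      · exact Or.inl ⟨p, hp, hpre⟩
      · exact Or.inr ⟨p, hp, hinf'⟩

-- ===== VERDICT (by name: the statement is the Claim_ definition above) =====
theorem detect_self_harm_spec : Claim_equal_detect_self_harm := by
  intro m _
  unfold Spec_detect_self_harm detect_self_harm detect_self_harm_alt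
  simp only []
  rw [Bool.eq_iff_iff, scanSuffixes_eq_true_iff]
  simp [List.any_eq_true, PySem.Chars.isIn_iff_infix]
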